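-- pv_equiv track=rewrite | github.com/salmanhiro/repo-CP-salman | warmup/countvalley.py | countvalley
-- ===== SOURCE A (Python) =====
-- def countvalley(n,s):
-- 	ele = 0
-- 	count = 0
-- 	for i in range(n):
-- 		if s[i] == 'U':
-- 			ele = ele + 1
-- 			if ele == 0:
-- 				count = count + 1
-- 		else:
-- 			ele = ele - 1
--
-- 	return count
-- ===== SOURCE B (Python) =====
-- def countvalley(n, s):
--     # two passes: build the altitude prefix table, then count the steps
--     # that are 'U' and land at sea level
--     alt = []
--     cur = 0
--     for i in range(n):
--         cur += 1 if s[i] == 'U' else -1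
--         alt.append(cur)
--     return sum(1 for i in range(n) if s[i] == 'U' and alt[i] == 0)
-- ===== Notes on version B (the rewrite author's own statement) =====
-- stated objective: alternative
-- what changed: B separates the work into two passes - first building the full altitude prefix array, then a counting pass over it - instead of A's single fused loop with two accumulators.
import Mathlib
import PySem

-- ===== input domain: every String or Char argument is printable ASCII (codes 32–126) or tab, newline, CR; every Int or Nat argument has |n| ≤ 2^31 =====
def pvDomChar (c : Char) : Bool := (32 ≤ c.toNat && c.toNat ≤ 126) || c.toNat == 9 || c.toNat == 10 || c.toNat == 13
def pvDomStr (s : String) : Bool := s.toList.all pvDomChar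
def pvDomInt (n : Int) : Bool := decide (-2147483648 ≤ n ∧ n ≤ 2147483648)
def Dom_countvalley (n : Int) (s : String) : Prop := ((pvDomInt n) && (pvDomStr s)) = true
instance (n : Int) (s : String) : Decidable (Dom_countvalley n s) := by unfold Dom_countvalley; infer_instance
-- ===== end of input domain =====

-- B builds the altitude prefix table in one pass and counts in a second pass,
-- instead of A's single fused loop; same O(n) cost (objective: alternative).

-- ===== PORT A =====
-- s[i] (in range whenever Pre_ holds; out of range Python raises, here getD ' ')
def cvCh (s : String) (i : Int) : Char := (PySem.Str.pyGet? s i).getD ' '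

def cvStepA (s : String) (p : Int × Int) (i : Int) : Int × Int :=
  if cvCh s i = 'U' then
    (p.1 + 1, if p.1 + 1 = 0 then p.2 + 1 else p.2)
  else
    (p.1 - 1, p.2)

def countvalley (n : Int) (s : String) : Int :=
  ((PySem.List.pyRange 0 n 1).foldl (cvStepA s) (0, 0)).2

-- ===== PORT B =====
def cvStepB (s : String) (p : Int × List Int) (i : Int) : Int × List Int :=
  let cur := p.1 + (if cvCh s i = 'U' then 1 else -1)
  (cur, p.2 ++ [cur])

def cvSumStep (s : String) (alt : List Int) (acc : Int) (i : Int) : Int :=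
  acc + (if cvCh s i = 'U' ∧ (PySem.List.pyGet? alt i).getD 1 = 0 then 1 else 0)

def countvalley_alt (n : Int) (s : String) : Int :=
  let alt := ((PySem.List.pyRange 0 n 1).foldl (cvStepB s) (0, [])).2
  (PySem.List.pyRange 0 n 1).foldl (cvSumStep s alt) 0

-- ===== PRECONDITION & SPEC =====
-- Python A raises IndexError when n > len(s); Pre_ excludes exactly those inputs.
def Pre_countvalley (n : Int) (s : String) : Prop := n ≤ (s.length : Int)
instance (n : Int) (s : String) : Decidable (Pre_countvalley n s) := by unfold Pre_countvalley; infer_instance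
def pvWitness_countvalley : Int × String := (6, "DDUUUU")

def Spec_countvalley (n : Int) (s : String) (out : Int) : Prop := out = countvalley_alt n s
instance (n : Int) (s : String) (out : Int) : Decidable (Spec_countvalley n s out) := by unfold Spec_countvalley; infer_instance

-- ===== CLAIM (what is proved, stated in full; the proofs are below) =====
def Claim_equal_countvalley : Prop := ∀ (n : Int) (s : String), Dom_countvalley n s → Pre_countvalley n s → Spec_countvalley n s (countvalley n s)

-- ===== LEMMAS AND PROOFS =====

-- in-range lookups into the altitude table are unchanged by appending one entry
lemma pyGet?_append_left_of_lt (alt : List Int) (y : Int) (i : Int)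
    (h0 : 0 ≤ i) (h1 : i < (alt.length : Int)) :
    PySem.List.pyGet? (alt ++ [y]) i = PySem.List.pyGet? alt i := by
  rw [PySem.List.pyGet?_of_nonneg _ h0, PySem.List.pyGet?_of_nonneg _ h0]
  have hi : i.toNat < alt.length := by omega
  exact List.getElem?_append_left hi

-- joint invariant of A's fused loop and B's two passes over range(m)
lemma cv_invariant (s : String) (m : Nat) :
    (((PySem.List.pyRange 0 m 1).foldl (cvStepB s) (0, [])).2).length = m ∧
    ((PySem.List.pyRange 0 m 1).foldl (cvStepB s) (0, [])).1 =
      ((PySem.List.pyRange 0 m 1).foldl (cvStepA s) (0, 0)).1 ∧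
    (PySem.List.pyRange 0 m 1).foldl
        (cvSumStep s (((PySem.List.pyRange 0 m 1).foldl (cvStepB s) (0, [])).2)) 0 =
      ((PySem.List.pyRange 0 m 1).foldl (cvStepA s) (0, 0)).2 := by
  induction m with
  | zero => simp [PySem.List.pyRange_one_eq_nil]
  | succ m ih =>
    obtain ⟨hlen, hele, hsum⟩ := ih
    have hsplit : PySem.List.pyRange 0 ((m : Int) + 1) 1 =
        PySem.List.pyRange 0 (m : Int) 1 ++ [(m : Int)] :=
      PySem.List.pyRange_one_succ_right (Int.natCast_nonneg m)
    have hcast : (((m + 1 : Nat)) : Int) = (m : Int) + 1 := by push_cast; ring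
    rw [hcast, hsplit, List.foldl_append, List.foldl_append, List.foldl_append]
    set B0 := (PySem.List.pyRange 0 (m : Int) 1).foldl (cvStepB s) (0, []) with hB0
    set A0 := (PySem.List.pyRange 0 (m : Int) 1).foldl (cvStepA s) (0, 0) with hA0
    -- the one new step
    have hstep2 : (List.foldl (cvStepB s) B0 [(m : Int)]).2
        = B0.2 ++ [B0.1 + (if cvCh s (m : Int) = 'U' then 1 else -1)] := by
      simp [cvStepB]
    have hlen' : (List.foldl (cvStepB s) B0 [(m : Int)]).2.length = m + 1 := by
      rw [hstep2]; simp [hlen]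
    refine ⟨hlen', ?_, ?_⟩
    · simp only [List.foldl_cons, List.foldl_nil, cvStepB, cvStepA, hele]
      split_ifs <;> simp [sub_eq_add_neg]
    · -- the counting pass over the extended table
      have hagree : (PySem.List.pyRange 0 (m : Int) 1).foldl
            (cvSumStep s ((List.foldl (cvStepB s) B0 [(m : Int)]).2)) 0
          = (PySem.List.pyRange 0 (m : Int) 1).foldl (cvSumStep s B0.2) 0 := by
        apply PySem.List.foldl_congr_mem
        intro acc x hx
        rw [PySem.List.mem_pyRange_one] at hx
        unfold cvSumStep
        rw [hstep2, pyGet?_append_left_of_lt _ _ _ hx.1 (by omega)]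
      rw [hagree, hsum]
      -- the final element of the table
      have hstep2' : (cvStepB s B0 (m : Int)).2
          = B0.2 ++ [B0.1 + (if cvCh s (m : Int) = 'U' then 1 else -1)] := by
        simp [cvStepB]
      have hget : PySem.List.pyGet? ((cvStepB s B0 (m : Int)).2) (m : Int)
          = some (B0.1 + (if cvCh s (m : Int) = 'U' then 1 else -1)) := by
        rw [hstep2', PySem.List.pyGet?_natCast, ← hlen]
        exact List.getElem?_concat_length
      simp only [List.foldl_cons, List.foldl_nil, cvSumStep, cvStepA]
      rw [hget]
      simp only [Option.getD_some, hele]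
      by_cases hU : cvCh s (m : Int) = 'U' <;> simp [hU] <;> split_ifs <;> omega

-- ===== VERDICT (by name: the statement is the Claim_ definition above) =====
theorem countvalley_spec : Claim_equal_countvalley := by
  intro n s _ _
  unfold Spec_countvalley countvalley countvalley_alt
  by_cases hn : n ≤ 0
  · simp [PySem.List.pyRange_one_eq_nil hn]
  · have h : n = ((n.toNat : Nat) : Int) := by omega
    rw [h]
    exact ((cv_invariant s n.toNat).2.2).symm
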